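-- pv_equiv track=rewrite | github.com/deckercjames/img_to_sand | src/path_elaboration/elaborator.py | elaborate_border
-- ===== SOURCE A (Python) =====
-- import heapq
--
-- def elaborate_border(num_rows, num_cols, entry_point, exit_point):
--
--     # Check input
--     entry_r, entry_c = entry_point
--     exit_r, exit_c = exit_point
--     if (entry_r != 0 and entry_r != num_rows) and (entry_c != 0 and entry_c != num_cols):
--         raise Exception("Entry point not on edge")
--     if (exit_r != 0 and exit_r != num_rows) and (exit_c != 0 and exit_c != num_cols):
--         raise Exception("Exit point not on edge")
--
--     # If they are on the same edge, no intermediate poisnts are necessary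
--     if entry_r == exit_r or entry_c == exit_c:
--         return []
--
--     open_list = []
--     heapq.heappush(open_list, (0, (entry_point, [])))
--
--     visited = set()
--
--     while len(open_list) > 0:
--
--         cost, (position, path) = heapq.heappop(open_list)
--
--         if position in visited:
--             continue
--
--         if position == exit_point:
--             return path[:-1]
--
--         visited.add(position)
--
--         pos_r, pos_c = position
--
--         for child_r, child_c in ((0,0), (0,num_cols), (num_rows,0), (num_rows,num_cols), exit_point):
--             if pos_r != child_r and pos_c != child_c:
--                 continue
--             step_cost = abs(child_r - pos_r) + abs(child_c - pos_c)
--             child_pos = (child_r, child_c)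
--             new_path = path + [child_pos]
--             heapq.heappush(open_list, (cost+step_cost, (child_pos, new_path)))
--
--     raise Exception("Failed to elaborate border. Table dims {}x{}. Entry {}, Exit {}".format(num_rows, num_cols, entry_point, exit_point))
-- ===== SOURCE B (Python) =====
-- def elaborate_border(num_rows, num_cols, entry_point, exit_point):
--     entry_r, entry_c = entry_point
--     exit_r, exit_c = exit_point
--     if (entry_r != 0 and entry_r != num_rows) and (entry_c != 0 and entry_c != num_cols):
--         raise Exception("Entry point not on edge")
--     if (exit_r != 0 and exit_r != num_rows) and (exit_c != 0 and exit_c != num_cols):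
--         raise Exception("Exit point not on edge")
--     if entry_r == exit_r or entry_c == exit_c:
--         return []
--     nodes = [(0, 0), (0, num_cols), (num_rows, 0), (num_rows, num_cols), exit_point]
--     def routes(pos, path, cost):
--         if pos == exit_point:
--             return [(cost, path)]
--         out = []
--         for n in nodes:
--             if n == pos or n in path:
--                 continue
--             if n[0] != pos[0] and n[1] != pos[1]:
--                 continue
--             out.extend(routes(n, path + [n], cost + abs(n[0] - pos[0]) + abs(n[1] - pos[1])))
--         return out
--     best_cost, best_path = min(routes(entry_point, [], 0))
--     return best_path[:-1]
-- ===== Notes on version B (the rewrite author's own statement) =====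
-- stated objective: alternative
-- what changed: The heapq-based uniform-cost search that grows paths best-first with a visited set is replaced by a recursive enumeration of all simple routes through the four corners and a single min() under Python's (cost, path) tuple order.
import Mathlib
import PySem

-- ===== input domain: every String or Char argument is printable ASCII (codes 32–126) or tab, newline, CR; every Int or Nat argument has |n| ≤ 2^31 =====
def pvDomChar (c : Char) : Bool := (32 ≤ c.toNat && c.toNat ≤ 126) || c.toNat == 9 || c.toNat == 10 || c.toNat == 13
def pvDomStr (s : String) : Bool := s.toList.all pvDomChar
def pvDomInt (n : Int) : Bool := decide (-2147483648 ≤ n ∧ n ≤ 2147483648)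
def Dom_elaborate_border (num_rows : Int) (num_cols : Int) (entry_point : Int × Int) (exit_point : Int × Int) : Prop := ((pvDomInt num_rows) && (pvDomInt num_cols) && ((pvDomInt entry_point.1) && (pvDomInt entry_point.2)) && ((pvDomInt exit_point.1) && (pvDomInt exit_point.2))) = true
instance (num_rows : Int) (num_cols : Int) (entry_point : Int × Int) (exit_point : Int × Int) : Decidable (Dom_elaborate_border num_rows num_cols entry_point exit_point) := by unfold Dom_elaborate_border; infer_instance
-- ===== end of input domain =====

-- ===== PORT A =====
-- B replaces A's heapq uniform-cost search by exhaustive enumeration of simple corner routes + one min (objective: alternative).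
-- Python tuple order on heap entries (cost, (position, path)); heappop yields the minimum entry.
def pvLtPos (a b : Int × Int) : Bool := a.1 < b.1 || (a.1 == b.1 && a.2 < b.2)

def pvLtPath : List (Int × Int) → List (Int × Int) → Bool
  | [], [] => false
  | [], _ :: _ => true
  | _ :: _, [] => false
  | a :: as, b :: bs => pvLtPos a b || (a == b && pvLtPath as bs)

def pvLtEntry (a b : Int × ((Int × Int) × List (Int × Int))) : Bool :=
  a.1 < b.1 || (a.1 == b.1 && (pvLtPos a.2.1 b.2.1 || (a.2.1 == b.2.1 && pvLtPath a.2.2 b.2.2)))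

-- heapq.heappop: extract the minimum entry (entries comparing equal are identical tuples)
def pvPopMin (m : Int × ((Int × Int) × List (Int × Int))) :
    List (Int × ((Int × Int) × List (Int × Int))) →
    (Int × ((Int × Int) × List (Int × Int))) × List (Int × ((Int × Int) × List (Int × Int)))
  | [] => (m, [])
  | y :: ys =>
    if pvLtEntry y m then
      let r := pvPopMin y ys
      (r.1, m :: r.2)
    else
      let r := pvPopMin m ys
      (r.1, y :: r.2)

-- the five push candidates, in A's order, with A's alignment filter and step costs
def pvChildren (num_rows num_cols : Int) (exit_point : Int × Int)
    (cost : Int) (pos : Int × Int) (path : List (Int × Int)) :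
    List (Int × ((Int × Int) × List (Int × Int))) :=
  ([((0 : Int), (0 : Int)), (0, num_cols), (num_rows, 0), (num_rows, num_cols), exit_point].filter
      (fun c => !(decide (pos.1 ≠ c.1) && decide (pos.2 ≠ c.2)))).map
    (fun c => (cost + |c.1 - pos.1| + |c.2 - pos.2|, (c, path ++ [c])))

-- A's while loop; fuel 32 bounds the pop count (≤ 1 + 5·5 pushes); on the
-- empty open list Python raises ("Failed to elaborate"), which is proved unreachable under Pre_
def pvLoopA (num_rows num_cols : Int) (exit_point : Int × Int) :
    Nat → List (Int × ((Int × Int) × List (Int × Int))) → List (Int × Int) → List (Int × Int)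
  | 0, _, _ => []
  | _ + 1, [], _ => []
  | n + 1, t :: ts, vis =>
    let pr := pvPopMin t ts
    if vis.contains pr.1.2.1 then pvLoopA num_rows num_cols exit_point n pr.2 vis
    else if pr.1.2.1 == exit_point then pr.1.2.2.dropLast
    else pvLoopA num_rows num_cols exit_point n
      (pr.2 ++ pvChildren num_rows num_cols exit_point pr.1.1 pr.1.2.1 pr.1.2.2)
      (vis ++ [pr.1.2.1])

def elaborate_border (num_rows : Int) (num_cols : Int) (entry_point : Int × Int) (exit_point : Int × Int) : List (Int × Int) :=
  if (entry_point.1 ≠ 0 ∧ entry_point.1 ≠ num_rows) ∧ (entry_point.2 ≠ 0 ∧ entry_point.2 ≠ num_cols) then []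
  else if (exit_point.1 ≠ 0 ∧ exit_point.1 ≠ num_rows) ∧ (exit_point.2 ≠ 0 ∧ exit_point.2 ≠ num_cols) then []
  else if entry_point.1 = exit_point.1 ∨ entry_point.2 = exit_point.2 then []
  else pvLoopA num_rows num_cols exit_point 32 [(0, (entry_point, []))] []

-- ===== PORT B =====
def pvNodes (num_rows num_cols : Int) (exit_point : Int × Int) : List (Int × Int) :=
  [((0 : Int), (0 : Int)), (0, num_cols), (num_rows, 0), (num_rows, num_cols), exit_point]

-- Python tuple order on B's (cost, path) pairs, as used by min()
def pvLtPair (a b : Int × List (Int × Int)) : Bool :=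
  a.1 < b.1 || (a.1 == b.1 && pvLtPath a.2 b.2)

-- B's recursive route enumeration; fuel 6 bounds the recursion depth (paths are duplicate-free
-- over at most 5 node values, so Python's recursion never goes deeper)
def pvRoutes (num_rows num_cols : Int) (exit_point : Int × Int) :
    Nat → (Int × Int) → List (Int × Int) → Int → List (Int × List (Int × Int))
  | 0, _, _, _ => []
  | n + 1, pos, path, cost =>
    if pos == exit_point then [(cost, path)]
    else (pvNodes num_rows num_cols exit_point).flatMap
      (fun nd =>
        if nd == pos || path.contains nd then []
        else if nd.1 ≠ pos.1 ∧ nd.2 ≠ pos.2 then []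
        else pvRoutes num_rows num_cols exit_point n nd (path ++ [nd])
               (cost + |nd.1 - pos.1| + |nd.2 - pos.2|))

def elaborate_border_alt (num_rows : Int) (num_cols : Int) (entry_point : Int × Int) (exit_point : Int × Int) : List (Int × Int) :=
  if (entry_point.1 ≠ 0 ∧ entry_point.1 ≠ num_rows) ∧ (entry_point.2 ≠ 0 ∧ entry_point.2 ≠ num_cols) then []
  else if (exit_point.1 ≠ 0 ∧ exit_point.1 ≠ num_rows) ∧ (exit_point.2 ≠ 0 ∧ exit_point.2 ≠ num_cols) then []
  else if entry_point.1 = exit_point.1 ∨ entry_point.2 = exit_point.2 then []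
  else
    match pvRoutes num_rows num_cols exit_point 6 entry_point [] 0 with
    | [] => []
    | c :: cs => (cs.foldl (fun acc d => if pvLtPair d acc then d else acc) c).2.dropLast

-- ===== PRECONDITION & SPEC =====
-- Pre_ admits exactly the inputs where Python A returns: both points on an edge (otherwise A raises).
def Pre_elaborate_border (num_rows : Int) (num_cols : Int) (entry_point : Int × Int) (exit_point : Int × Int) : Prop :=
  (entry_point.1 = 0 ∨ entry_point.1 = num_rows ∨ entry_point.2 = 0 ∨ entry_point.2 = num_cols) ∧
  (exit_point.1 = 0 ∨ exit_point.1 = num_rows ∨ exit_point.2 = 0 ∨ exit_point.2 = num_cols)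
instance (num_rows : Int) (num_cols : Int) (entry_point : Int × Int) (exit_point : Int × Int) : Decidable (Pre_elaborate_border num_rows num_cols entry_point exit_point) := by unfold Pre_elaborate_border; infer_instance

def pvWitness_elaborate_border : Int × Int × (Int × Int) × (Int × Int) := (5, 7, (0, 2), (3, 7))

def Spec_elaborate_border (num_rows : Int) (num_cols : Int) (entry_point : Int × Int) (exit_point : Int × Int) (out : List (Int × Int)) : Prop := out = elaborate_border_alt num_rows num_cols entry_point exit_point
instance (num_rows : Int) (num_cols : Int) (entry_point : Int × Int) (exit_point : Int × Int) (out : List (Int × Int)) : Decidable (Spec_elaborate_border num_rows num_cols entry_point exit_point out) := by unfold Spec_elaborate_border; infer_instance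

-- ===== CLAIM (what is proved, stated in full; the proofs are below) =====
def Claim_equal_elaborate_border : Prop := ∀ (num_rows : Int) (num_cols : Int) (entry_point : Int × Int) (exit_point : Int × Int), Dom_elaborate_border num_rows num_cols entry_point exit_point → Pre_elaborate_border num_rows num_cols entry_point exit_point → Spec_elaborate_border num_rows num_cols entry_point exit_point (elaborate_border num_rows num_cols entry_point exit_point)

-- ===== LEMMAS AND PROOFS =====
-- ===== order lemmas =====
theorem pvLtPos_iff (a b : Int × Int) : pvLtPos a b = true ↔ (a.1 < b.1 ∨ (a.1 = b.1 ∧ a.2 < b.2)) := by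
  simp [pvLtPos]

theorem pvLtPos_irrefl (a : Int × Int) : pvLtPos a a = false := by simp [pvLtPos]

theorem pvLtPath_irrefl : ∀ p, pvLtPath p p = false := by
  intro p; induction p with
  | nil => rfl
  | cons a as ih => simp [pvLtPath, pvLtPos_irrefl, ih]

theorem pvLtPath_trans : ∀ p q r, pvLtPath p q = true → pvLtPath q r = true → pvLtPath p r = true := by
  intro p; induction p with
  | nil => intro q r hq hr
           cases q with
           | nil => simp [pvLtPath] at hq
           | cons b bs => cases r with
             | nil => simp [pvLtPath] at hr
             | cons c cs => simp [pvLtPath]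
  | cons a as ih =>
      intro q r hq hr
      cases q with
      | nil => simp [pvLtPath] at hq
      | cons b bs =>
        cases r with
        | nil => simp [pvLtPath] at hr
        | cons c cs =>
          simp only [pvLtPath, Bool.or_eq_true, Bool.and_eq_true, beq_iff_eq] at hq hr ⊢
          rcases hq with h1 | ⟨hab, h2⟩
          · rcases hr with h3 | ⟨hbc, h4⟩
            · left; rw [pvLtPos_iff] at h1 h3 ⊢
              rcases h1 with h | ⟨h, h'⟩ <;> rcases h3 with g | ⟨g, g'⟩ <;>
                [left; left; left; right] <;> omega
            · subst hbc; left; exact h1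
          · subst hab
            rcases hr with h3 | ⟨hbc, h4⟩
            · left; exact h3
            · subst hbc; right; exact ⟨rfl, ih _ _ h2 h4⟩

theorem pvLtPath_total : ∀ p q, p ≠ q → pvLtPath p q = true ∨ pvLtPath q p = true := by
  intro p; induction p with
  | nil => intro q hq; cases q with
    | nil => exact absurd rfl hq
    | cons b bs => left; simp [pvLtPath]
  | cons a as ih =>
      intro q hq
      cases q with
      | nil => right; simp [pvLtPath]
      | cons b bs =>
        by_cases hab : a = b
        · subst hab
          have : as ≠ bs := fun h => hq (by rw [h])
          rcases ih bs this with h | h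
          · left; simp [pvLtPath, h]
          · right; simp [pvLtPath, h]
        · have : a.1 < b.1 ∨ (a.1 = b.1 ∧ a.2 < b.2) ∨ b.1 < a.1 ∨ (b.1 = a.1 ∧ b.2 < a.2) := by
            rcases a with ⟨a1,a2⟩; rcases b with ⟨b1,b2⟩
            simp only [Prod.mk.injEq, not_and] at hab
            by_cases h1 : a1 = b1
            · subst h1; simp at hab ⊢; omega
            · omega
          rcases this with h | h | h | h
          · left; simp [pvLtPath, pvLtPos_iff]; tauto
          · left; simp [pvLtPath, pvLtPos_iff]; tauto
          · right; simp [pvLtPath, pvLtPos_iff]; tauto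
          · right; simp [pvLtPath, pvLtPos_iff]; tauto

-- entry order
theorem pvLtEntry_irrefl (a : Int × ((Int × Int) × List (Int × Int))) : pvLtEntry a a = false := by
  simp [pvLtEntry, pvLtPos_irrefl, pvLtPath_irrefl]

theorem pvLtEntry_trans {a b c : Int × ((Int × Int) × List (Int × Int))}
    (h1 : pvLtEntry a b = true) (h2 : pvLtEntry b c = true) : pvLtEntry a c = true := by
  obtain ⟨a1, ⟨⟨ap1, ap2⟩, al⟩⟩ := a
  obtain ⟨b1, ⟨⟨bp1, bp2⟩, bl⟩⟩ := b
  obtain ⟨c1, ⟨⟨cp1, cp2⟩, cl⟩⟩ := c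
  simp only [pvLtEntry, pvLtPos, Bool.or_eq_true, Bool.and_eq_true, beq_iff_eq,
    decide_eq_true_eq, Prod.mk.injEq] at h1 h2 ⊢
  rcases h1 with h1 | ⟨e1, h1⟩
  · rcases h2 with h2 | ⟨e2, h2⟩ <;> [left; left] <;> omega
  · rcases h2 with h2 | ⟨e2, h2⟩
    · left; omega
    · right; refine ⟨by omega, ?_⟩
      rcases h1 with (h1 | h1) | ⟨⟨p1, p1'⟩, h1⟩
      · rcases h2 with (h2 | h2) | ⟨⟨p2, p2'⟩, h2⟩ <;> [skip; skip; skip] <;> left <;> omega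
      · rcases h2 with (h2 | h2) | ⟨⟨p2, p2'⟩, h2⟩ <;> left <;> omega
      · rcases h2 with (h2 | h2) | ⟨⟨p2, p2'⟩, h2⟩
        · left; omega
        · left; omega
        · right; exact ⟨⟨by omega, by omega⟩, pvLtPath_trans _ _ _ h1 h2⟩

theorem pvLtEntry_total (a b : Int × ((Int × Int) × List (Int × Int))) (h : a ≠ b) :
    pvLtEntry a b = true ∨ pvLtEntry b a = true := by
  obtain ⟨a1, ⟨⟨ap1, ap2⟩, al⟩⟩ := a
  obtain ⟨b1, ⟨⟨bp1, bp2⟩, bl⟩⟩ := b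
  simp only [pvLtEntry, pvLtPos, Bool.or_eq_true, Bool.and_eq_true, beq_iff_eq,
    decide_eq_true_eq, Prod.mk.injEq]
  by_cases hc : a1 = b1
  · by_cases h1 : ap1 = bp1
    · by_cases h2 : ap2 = bp2
      · have hl : al ≠ bl := by
          intro hh; exact h (by simp [hc, h1, h2, hh])
        rcases pvLtPath_total al bl hl with g | g
        · left; right; exact ⟨by omega, Or.inr ⟨⟨by omega, by omega⟩, g⟩⟩
        · right; right; exact ⟨by omega, Or.inr ⟨⟨by omega, by omega⟩, g⟩⟩
      · rcases Int.lt_or_lt_of_ne h2 with g | g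
        · left; right; exact ⟨by omega, Or.inl (by omega)⟩
        · right; right; exact ⟨by omega, Or.inl (by omega)⟩
    · rcases Int.lt_or_lt_of_ne h1 with g | g
      · left; right; exact ⟨by omega, Or.inl (by omega)⟩
      · right; right; exact ⟨by omega, Or.inl (by omega)⟩
  · rcases Int.lt_or_lt_of_ne hc with g | g
    · left; left; exact g
    · right; left; exact g

theorem pvLtEntry_asymm {a b} (h : pvLtEntry a b = true) : pvLtEntry b a = false := by
  by_contra hc
  simp only [Bool.not_eq_false] at hc
  have := pvLtEntry_trans h hc
  rw [pvLtEntry_irrefl] at this; exact absurd this (by simp)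

theorem pvLtEntry_false_elim {a b} (h : pvLtEntry a b = false) : a = b ∨ pvLtEntry b a = true := by
  by_cases hab : a = b
  · left; exact hab
  · rcases pvLtEntry_total a b hab with g | g
    · rw [g] at h; cases h
    · right; exact g

-- a ≤ b in the entry order
def pvLeE (a b : Int × ((Int × Int) × List (Int × Int))) : Prop := pvLtEntry b a = false

theorem pvLeE_refl (a) : pvLeE a a := pvLtEntry_irrefl a

theorem pvLeE_trans {a b c} (h1 : pvLeE a b) (h2 : pvLeE b c) : pvLeE a c := by
  unfold pvLeE at *
  by_contra hc
  simp only [Bool.not_eq_false] at hc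
  rcases eq_or_ne b a with hba | hba
  · subst hba; rw [hc] at h2; cases h2
  · rcases pvLtEntry_total b a hba with g | g
    · rw [g] at h1; cases h1
    · have := pvLtEntry_trans hc g
      rw [this] at h2; cases h2

theorem pvLeE_antisymm {a b} (h1 : pvLeE a b) (h2 : pvLeE b a) : a = b := by
  unfold pvLeE at *
  rcases pvLtEntry_false_elim h1 with g | g
  · exact g.symm
  · rw [g] at h2; cases h2

theorem pvLeE_of_lt {a b} (h : pvLtEntry a b = true) : pvLeE a b := pvLtEntry_asymm h

-- pvPopMin spec
theorem pvPopMin_spec : ∀ (xs : List (Int × ((Int × Int) × List (Int × Int)))) (m),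
    (pvPopMin m xs).1 ∈ m :: xs ∧ (m :: xs).Perm ((pvPopMin m xs).1 :: (pvPopMin m xs).2) ∧
    ∀ y ∈ m :: xs, pvLeE (pvPopMin m xs).1 y := by
  intro xs
  induction xs with
  | nil =>
      intro m
      refine ⟨by simp [pvPopMin], by simp [pvPopMin], ?_⟩
      intro y hy; simp at hy; subst hy; exact pvLeE_refl _
  | cons y ys ih =>
      intro m
      by_cases h : pvLtEntry y m = true
      · obtain ⟨hmem, hperm, hmin⟩ := ih y
        have hdef : pvPopMin m (y :: ys) = ((pvPopMin y ys).1, m :: (pvPopMin y ys).2) := by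
          simp [pvPopMin, h]
        rw [hdef]
        refine ⟨?_, ?_, ?_⟩
        · simp only [List.mem_cons] at hmem ⊢; tauto
        · exact ((List.Perm.cons m) hperm).trans
            (List.Perm.swap (pvPopMin y ys).1 m (pvPopMin y ys).2)
        · intro z hz
          rcases List.mem_cons.mp hz with h1 | h1
          · subst h1
            exact pvLeE_trans (hmin y (by simp)) (pvLeE_of_lt h)
          · exact hmin z h1
      · have h' : pvLtEntry y m = false := by revert h; cases pvLtEntry y m <;> simp
        obtain ⟨hmem, hperm, hmin⟩ := ih m
        have hdef : pvPopMin m (y :: ys) = ((pvPopMin m ys).1, y :: (pvPopMin m ys).2) := by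
          simp [pvPopMin, h']
        rw [hdef]
        refine ⟨?_, ?_, ?_⟩
        · simp only [List.mem_cons] at hmem ⊢; tauto
        · exact ((List.Perm.swap y m ys).trans ((List.Perm.cons y) hperm)).trans
            (List.Perm.swap (pvPopMin m ys).1 y (pvPopMin m ys).2)
        · intro z hz
          rcases List.mem_cons.mp hz with h1 | h1
          · subst h1; exact hmin z (by simp)
          · rcases List.mem_cons.mp h1 with h2 | h2
            · subst h2; exact pvLeE_trans (hmin m (by simp)) h'
            · exact hmin z (by simp [h2])
-- ===== geometry / path definitions for the proof =====
def pvAligned (a b : Int × Int) : Prop := a.1 = b.1 ∨ a.2 = b.2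

def pvW (a b : Int × Int) : Int := |b.1 - a.1| + |b.2 - a.2|

def pvCostFrom (u : Int × Int) : List (Int × Int) → Int
  | [] => 0
  | v :: r => pvW u v + pvCostFrom v r

def pvEndFrom (u : Int × Int) : List (Int × Int) → Int × Int
  | [] => u
  | v :: r => pvEndFrom v r

def pvCorners (R C : Int) : List (Int × Int) := [(0, 0), (0, C), (R, 0), (R, C)]

theorem pvNodes_eq (R C : Int) (x : Int × Int) : pvNodes R C x = pvCorners R C ++ [x] := rfl

def pvStep (R C : Int) (x : Int × Int) (a b : Int × Int) : Prop :=
  b ∈ pvNodes R C x ∧ pvAligned a b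

def pvValid (R C : Int) (x e : Int × Int) (p : List (Int × Int)) : Prop :=
  List.IsChain (pvStep R C x) (e :: p)

def pvGoodTo (R C : Int) (x e v : Int × Int) (p : List (Int × Int)) : Prop :=
  pvValid R C x e p ∧ p.Nodup ∧ e ∉ p ∧ pvEndFrom e p = v

def pvKey (e : Int × Int) (p : List (Int × Int)) : Int × ((Int × Int) × List (Int × Int)) :=
  (pvCostFrom e p, (pvEndFrom e p, p))

-- basic lemmas
theorem pvW_nonneg (a b : Int × Int) : 0 ≤ pvW a b := by
  have h1 := abs_nonneg (b.1 - a.1); have h2 := abs_nonneg (b.2 - a.2)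
  unfold pvW; omega

theorem pvW_pos {a b : Int × Int} (h : a ≠ b) : 0 < pvW a b := by
  have h1 := abs_nonneg (b.1 - a.1); have h2 := abs_nonneg (b.2 - a.2)
  have : a.1 ≠ b.1 ∨ a.2 ≠ b.2 := by
    by_contra hc; push_neg at hc; exact h (Prod.ext hc.1 hc.2)
  rcases this with g | g
  · have := abs_pos.mpr (sub_ne_zero_of_ne (Ne.symm g)); unfold pvW; omega
  · have := abs_pos.mpr (sub_ne_zero_of_ne (Ne.symm g)); unfold pvW; omega

theorem pvCostFrom_nonneg : ∀ (p : List (Int × Int)) (u), 0 ≤ pvCostFrom u p := by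
  intro p; induction p with
  | nil => intro u; simp [pvCostFrom]
  | cons v r ih => intro u; have := pvW_nonneg u v; have := ih v; simp [pvCostFrom]; omega

theorem pvEndFrom_append : ∀ (p q : List (Int × Int)) (u),
    pvEndFrom u (p ++ q) = pvEndFrom (pvEndFrom u p) q := by
  intro p; induction p with
  | nil => intro q u; rfl
  | cons v r ih => intro q u; simp [pvEndFrom, ih]

theorem pvEndFrom_snoc (p : List (Int × Int)) (z u) : pvEndFrom u (p ++ [z]) = z := by
  rw [pvEndFrom_append]; rfl

theorem pvCostFrom_append : ∀ (p q : List (Int × Int)) (u),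
    pvCostFrom u (p ++ q) = pvCostFrom u p + pvCostFrom (pvEndFrom u p) q := by
  intro p; induction p with
  | nil => intro q u; simp [pvCostFrom, pvEndFrom]
  | cons v r ih => intro q u; simp [pvCostFrom, pvEndFrom, ih]; omega

theorem pvEndFrom_mem : ∀ (p : List (Int × Int)) (u), p ≠ [] → pvEndFrom u p ∈ p := by
  intro p; induction p with
  | nil => intro u h; exact absurd rfl h
  | cons v r ih =>
      intro u _
      cases r with
      | nil => simp [pvEndFrom]
      | cons w s =>
          simp only [pvEndFrom]
          exact List.mem_cons_of_mem v (ih v (by simp))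

theorem pvChain_append {S : (Int × Int) → (Int × Int) → Prop} :
    ∀ (p q : List (Int × Int)) (u),
    List.IsChain S (u :: (p ++ q)) ↔ List.IsChain S (u :: p) ∧ List.IsChain S (pvEndFrom u p :: q) := by
  intro p; induction p with
  | nil => intro q u; simp [pvEndFrom, List.isChain_singleton]
  | cons v r ih =>
      intro q u
      simp only [List.cons_append, List.isChain_cons_cons, ih, pvEndFrom]
      tauto

-- cost strictly grows along a duplicate-free extension
theorem pvCost_strict {e : Int × Int} {p r : List (Int × Int)} (hr : r ≠ [])
    (hnd : (p ++ r).Nodup) (he : e ∉ p ++ r) :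
    pvCostFrom e p < pvCostFrom e (p ++ r) := by
  cases r with
  | nil => exact absurd rfl hr
  | cons w r' =>
      rw [pvCostFrom_append]
      have h1 : 0 ≤ pvCostFrom w r' := pvCostFrom_nonneg r' w
      have h2 : 0 < pvW (pvEndFrom e p) w := by
        apply pvW_pos
        by_cases hp : p = []
        · subst hp; simp only [pvEndFrom]
          intro hh; subst hh; exact he (by simp)
        · intro hh
          have hmem : pvEndFrom e p ∈ p := pvEndFrom_mem p e hp
          rw [hh] at hmem
          exact List.disjoint_of_nodup_append hnd hmem (by simp)
      simp only [pvCostFrom]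
      omega

theorem pvKey_prefix_lt {e : Int × Int} {p r : List (Int × Int)} (hr : r ≠ [])
    (hnd : (p ++ r).Nodup) (he : e ∉ p ++ r) :
    pvLtEntry (pvKey e p) (pvKey e (p ++ r)) = true := by
  have := pvCost_strict (e := e) hr hnd he
  simp only [pvKey, pvLtEntry, Bool.or_eq_true, decide_eq_true_eq]
  left; exact this
-- lexicographic append congruence when neither list is a prefix of the other
theorem pvLtPath_append_congr : ∀ (p q a b : List (Int × Int)),
    (¬ p <+: q) → (¬ q <+: p) → pvLtPath (p ++ a) (q ++ b) = pvLtPath p q := by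
  intro p
  induction p with
  | nil => intro q a b h1 _; exact absurd (List.nil_prefix) h1
  | cons u p' ih =>
      intro q a b h1 h2
      cases q with
      | nil => exact absurd (List.nil_prefix) h2
      | cons w q' =>
          by_cases huw : u = w
          · subst huw
            have g1 : ¬ p' <+: q' := fun g => h1 (List.cons_prefix_cons.mpr ⟨rfl, g⟩)
            have g2 : ¬ q' <+: p' := fun g => h2 (List.cons_prefix_cons.mpr ⟨rfl, g⟩)
            simp only [List.cons_append, pvLtPath, pvLtPos_irrefl, beq_self_eq_true,
              Bool.true_and, Bool.false_or]
            exact ih q' a b g1 g2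
          · simp only [List.cons_append, pvLtPath]
            have : (u == w) = false := by simp [huw]
            simp [this]

theorem pvLtEntry_same_pos_false_iff (c1 c2 : Int) (v : Int × Int) (l1 l2 : List (Int × Int)) :
    pvLtEntry (c1, (v, l1)) (c2, (v, l2)) = false ↔
      (¬ c1 < c2 ∧ (c1 = c2 → pvLtPath l1 l2 = false)) := by
  simp only [pvLtEntry, pvLtPos_irrefl, beq_self_eq_true, Bool.true_and, Bool.false_or,
    Bool.or_eq_false_iff, Bool.and_eq_false_iff, decide_eq_false_iff_not, beq_eq_false_iff_ne]
  constructor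
  · rintro ⟨ha, hb | hb⟩
    · exact ⟨ha, fun hc => absurd hc hb⟩
    · exact ⟨ha, fun _ => hb⟩
  · rintro ⟨ha, hb⟩
    refine ⟨ha, ?_⟩
    by_cases hc : c1 = c2
    · right; exact hb hc
    · left; exact hc

theorem pv_not_prefix {R C : Int} {x e v : Int × Int} {p q : List (Int × Int)}
    (hq : pvGoodTo R C x e v q) (hc : pvCostFrom e p = pvCostFrom e q) (hne : p ≠ q) :
    ¬ p <+: q := by
  rintro ⟨r, hr⟩
  have hrne : r ≠ [] := by
    intro hh; subst hh; exact hne (by simpa using hr)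
  have := pvCost_strict (e := e) (p := p) (r := r) hrne (hr ▸ hq.2.1) (hr ▸ hq.2.2.1)
  rw [hr] at this; omega

theorem pvKey_snoc_mono {R C : Int} {x e v : Int × Int} {p q : List (Int × Int)}
    (hp : pvGoodTo R C x e v p) (hq : pvGoodTo R C x e v q)
    (h : pvLeE (pvKey e p) (pvKey e q)) (z : Int × Int) :
    pvLeE (pvKey e (p ++ [z])) (pvKey e (q ++ [z])) := by
  by_cases hpq : p = q
  · subst hpq; exact pvLeE_refl _
  unfold pvLeE at h ⊢
  have hep : pvEndFrom e p = v := hp.2.2.2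
  have heq : pvEndFrom e q = v := hq.2.2.2
  have kp : pvKey e p = (pvCostFrom e p, (v, p)) := by simp [pvKey, hep]
  have kq : pvKey e q = (pvCostFrom e q, (v, q)) := by simp [pvKey, heq]
  have kps : pvKey e (p ++ [z]) = (pvCostFrom e p + pvW v z, (z, p ++ [z])) := by
    simp [pvKey, pvCostFrom_append, pvEndFrom_snoc, hep, pvCostFrom, pvEndFrom]
  have kqs : pvKey e (q ++ [z]) = (pvCostFrom e q + pvW v z, (z, q ++ [z])) := by
    simp [pvKey, pvCostFrom_append, pvEndFrom_snoc, heq, pvCostFrom, pvEndFrom]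
  rw [kp, kq] at h; rw [kps, kqs]
  rw [pvLtEntry_same_pos_false_iff] at h
  rw [pvLtEntry_same_pos_false_iff]
  obtain ⟨h1, h2⟩ := h
  refine ⟨by omega, ?_⟩
  intro hceq
  have hcc : pvCostFrom e q = pvCostFrom e p := by omega
  have hqp : pvLtPath q p = false := h2 hcc
  have g1 : ¬ q <+: p := pv_not_prefix hp hcc (Ne.symm hpq)
  have g2 : ¬ p <+: q := pv_not_prefix hq hcc.symm hpq
  rw [pvLtPath_append_congr q p [z] [z] g1 g2]
  exact hqp

-- B's pair order agrees with the entry order at a fixed position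
theorem pvLtPair_eq_entry (c1 c2 : Int) (v : Int × Int) (l1 l2 : List (Int × Int)) :
    pvLtPair (c1, l1) (c2, l2) = pvLtEntry (c1, (v, l1)) (c2, (v, l2)) := by
  simp [pvLtPair, pvLtEntry, pvLtPos_irrefl]
-- ===== the loop invariant =====
structure PvInv (R C : Int) (e x : Int × Int)
    (opn : List (Int × ((Int × Int) × List (Int × Int)))) (vis : List (Int × Int)) : Prop where
  v_e : e ∈ vis
  v_x : x ∉ vis
  v_sub : ∀ v ∈ vis, v = e ∨ v ∈ pvCorners R C
  v_nodup : vis.Nodup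
  w_open : ∀ t ∈ opn, ∃ p z, t = pvKey e (p ++ [z]) ∧ pvValid R C x e (p ++ [z]) ∧
      p.Nodup ∧ e ∉ p ∧ (∀ u ∈ p, u ∈ vis) ∧ z ∈ pvNodes R C x
  v_min : ∀ v ∈ vis, ∃ pv, pvGoodTo R C x e v pv ∧
      (∀ q, pvGoodTo R C x e v q → pvLeE (pvKey e pv) (pvKey e q)) ∧
      (∀ z ∈ pvNodes R C x, pvAligned v z → z ∉ vis →
        ∃ t ∈ opn, t.2.1 = z ∧ pvLeE t (pvKey e (pv ++ [z])))

-- frontier: every good path to an unvisited endpoint is dominated by some open entry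
theorem pv_frontier {R C : Int} {e x : Int × Int}
    {opn : List (Int × ((Int × Int) × List (Int × Int)))} {vis : List (Int × Int)}
    (inv : PvInv R C e x opn vis) :
    ∀ (q : List (Int × Int)) (v : Int × Int), pvGoodTo R C x e v q → v ∉ vis →
      ∃ t ∈ opn, pvLeE t (pvKey e q) := by
  intro q
  induction q using List.reverseRecOn with
  | nil =>
      intro v hq hv
      have : v = e := by rw [← hq.2.2.2]; rfl
      subst this; exact absurd inv.v_e hv
  | append_singleton q' z ih =>
      intro v hq hv
      have hvz : v = z := by rw [← hq.2.2.2, pvEndFrom_snoc]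
      subst hvz
      obtain ⟨hval, hnd, he, _⟩ := hq
      have hnd' : q'.Nodup := (List.nodup_append.mp hnd).1
      have he' : e ∉ q' := fun h => he (List.mem_append_left _ h)
      have hval' : pvValid R C x e q' ∧ List.IsChain (pvStep R C x) (pvEndFrom e q' :: [v]) := by
        have := (pvChain_append q' [v] e).mp hval
        exact this
      have hstep : pvStep R C x (pvEndFrom e q') v := by
        have := hval'.2
        rw [List.isChain_cons_cons] at this
        exact this.1
      have hq' : pvGoodTo R C x e (pvEndFrom e q') q' := ⟨hval'.1, hnd', he', rfl⟩
      by_cases hv' : pvEndFrom e q' ∈ vis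
      · obtain ⟨pv, hpvg, hpvmin, hthird⟩ := inv.v_min _ hv'
        obtain ⟨t, htm, htz, htle⟩ := hthird v hstep.1 hstep.2 hv
        refine ⟨t, htm, ?_⟩
        have h1 : pvLeE (pvKey e pv) (pvKey e q') := hpvmin q' hq'
        have h2 : pvLeE (pvKey e (pv ++ [v])) (pvKey e (q' ++ [v])) :=
          pvKey_snoc_mono hpvg hq' h1 v
        exact pvLeE_trans htle h2
      · obtain ⟨t, htm, htle⟩ := ih _ hq' hv'
        refine ⟨t, htm, ?_⟩
        have h2 : pvLtEntry (pvKey e q') (pvKey e (q' ++ [v])) = true :=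
          pvKey_prefix_lt (by simp) hnd he
        exact pvLeE_trans htle (pvLeE_of_lt h2)
theorem pvKey_snoc (eu : Int × Int) (p : List (Int × Int)) (v z : Int × Int)
    (h : pvEndFrom eu p = v) :
    pvKey eu (p ++ [z]) = (pvCostFrom eu p + |z.1 - v.1| + |z.2 - v.2|, (z, p ++ [z])) := by
  have h1 : pvCostFrom eu (p ++ [z]) = pvCostFrom eu p + pvW v z := by
    rw [pvCostFrom_append, h]; simp [pvCostFrom]
  unfold pvKey
  rw [h1, pvEndFrom_snoc]
  unfold pvW
  have h2 : pvCostFrom eu p + (|z.1 - v.1| + |z.2 - v.2|) =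
      pvCostFrom eu p + |z.1 - v.1| + |z.2 - v.2| := by omega
  rw [h2]

-- children membership characterization
theorem pvChildren_mem {R C : Int} {x : Int × Int} (cost : Int) (pos : Int × Int)
    (path : List (Int × Int)) (t) :
    t ∈ pvChildren R C x cost pos path ↔
      ∃ c ∈ pvNodes R C x, pvAligned pos c ∧ t = (cost + |c.1 - pos.1| + |c.2 - pos.2|, (c, path ++ [c])) := by
  unfold pvChildren
  rw [List.mem_map]
  constructor
  · rintro ⟨c, hc, rfl⟩
    rw [List.mem_filter] at hc
    refine ⟨c, hc.1, ?_, rfl⟩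
    have := hc.2
    simp only [Bool.not_eq_eq_eq_not, Bool.not_true, Bool.and_eq_false_iff,
      decide_eq_false_iff_not, not_not] at this
    unfold pvAligned; tauto
  · rintro ⟨c, hc, hal, rfl⟩
    refine ⟨c, ?_, rfl⟩
    rw [List.mem_filter]
    refine ⟨hc, ?_⟩
    simp only [Bool.not_eq_eq_eq_not, Bool.not_true, Bool.and_eq_false_iff,
      decide_eq_false_iff_not, not_not]
    unfold pvAligned at hal; tauto

theorem pvChildren_length_le {R C : Int} {x : Int × Int} (cost : Int) (pos : Int × Int)
    (path : List (Int × Int)) : (pvChildren R C x cost pos path).length ≤ 5 := by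
  unfold pvChildren
  rw [List.length_map]
  exact le_trans (List.length_filter_le _ _) (by simp)

-- the main loop lemma
theorem pv_loop {R C : Int} {e x : Int × Int}
    (hreach : ∃ q0, pvGoodTo R C x e x q0) :
    ∀ (fuel : Nat) (opn : List (Int × ((Int × Int) × List (Int × Int)))) (vis : List (Int × Int)),
      PvInv R C e x opn vis →
      opn.length + 5 * (5 - vis.length) < fuel →
      ∃ P, pvGoodTo R C x e x P ∧ (∀ Q, pvGoodTo R C x e x Q → pvLeE (pvKey e P) (pvKey e Q)) ∧
        pvLoopA R C x fuel opn vis = P.dropLast := by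
  intro fuel
  induction fuel with
  | zero => intro opn vis _ hf; omega
  | succ n ihn =>
      intro opn vis inv hf
      cases opn with
      | nil =>
          obtain ⟨q0, hq0⟩ := hreach
          obtain ⟨t, htm, _⟩ := pv_frontier inv q0 x hq0 inv.v_x
          exact absurd htm (by simp)
      | cons t ts =>
          obtain ⟨hmem, hperm, hmin⟩ := pvPopMin_spec ts t
          obtain ⟨p, z, hkey, hval, hpnd, hpe, hpvis, hzn⟩ := inv.w_open _ hmem
          have hpos : (pvPopMin t ts).1.2.1 = z := by rw [hkey]; simp [pvKey, pvEndFrom_snoc]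
          have hpath : (pvPopMin t ts).1.2.2 = p ++ [z] := by rw [hkey]; rfl
          have hcost : (pvPopMin t ts).1.1 = pvCostFrom e (p ++ [z]) := by rw [hkey]; rfl
          have hrlen : (pvPopMin t ts).2.length + 1 = (t :: ts).length := by
            have := hperm.length_eq; simp at this ⊢; omega
          have hrest_sub : ∀ y ∈ (pvPopMin t ts).2, y ∈ t :: ts := by
            intro y hy
            exact hperm.symm.subset (by simp [hy])
          have hne_rest : ∀ y ∈ t :: ts, y ≠ (pvPopMin t ts).1 → y ∈ (pvPopMin t ts).2 := by
            intro y hy hne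
            have := hperm.subset hy
            rcases List.mem_cons.mp this with h | h
            · exact absurd h hne
            · exact h
          by_cases hvis : z ∈ vis
          · -- skipped pop
            have hcont : List.contains vis (pvPopMin t ts).1.2.1 = true := by
              rw [hpos]; exact List.contains_iff_mem.mpr hvis
            have hstep : pvLoopA R C x (n + 1) (t :: ts) vis = pvLoopA R C x n (pvPopMin t ts).2 vis := by
              simp only [pvLoopA, hcont, if_pos]
            rw [hstep]
            apply ihn
            · refine ⟨inv.v_e, inv.v_x, inv.v_sub, inv.v_nodup,
                fun t' ht' => inv.w_open t' (hrest_sub t' ht'), ?_⟩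
              intro v hv
              obtain ⟨pv, h1, h2, h3⟩ := inv.v_min v hv
              refine ⟨pv, h1, h2, ?_⟩
              intro z' hz' hal hnv
              obtain ⟨t', ht'm, ht'z, ht'le⟩ := h3 z' hz' hal hnv
              refine ⟨t', ?_, ht'z, ht'le⟩
              apply hne_rest t' ht'm
              intro hh
              rw [hh, hpos] at ht'z
              exact hnv (ht'z ▸ hvis)
            · have hlc : (t :: ts).length = ts.length + 1 := by simp
              omega
          · -- fresh position
            have hcont : List.contains vis (pvPopMin t ts).1.2.1 = false := by
              rw [hpos]
              by_contra hc
              simp only [Bool.not_eq_false] at hc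
              exact hvis (List.contains_iff_mem.mp hc)
            have hznp : z ∉ p := fun h => hvis (hpvis z h)
            have hzne : z ≠ e := fun h => hvis (h ▸ inv.v_e)
            have hPg : pvGoodTo R C x e z (p ++ [z]) := by
              refine ⟨hval, ?_, ?_, pvEndFrom_snoc _ _ _⟩
              · rw [List.nodup_append]
                refine ⟨hpnd, List.nodup_singleton _, ?_⟩
                intro a ha b hb
                simp only [List.mem_singleton] at hb
                subst hb
                exact fun hh => hznp (hh ▸ ha)
              · intro h
                rcases List.mem_append.mp h with h | h
                · exact hpe h
                · simp at h; exact hzne h.symm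
            have hPmin : ∀ Q, pvGoodTo R C x e z Q → pvLeE (pvKey e (p ++ [z])) (pvKey e Q) := by
              intro Q hQ
              obtain ⟨t', ht'm, ht'le⟩ := pv_frontier inv Q z hQ hvis
              have : pvLeE (pvPopMin t ts).1 t' := hmin t' ht'm
              rw [← hkey] at *
              exact pvLeE_trans this ht'le
            by_cases hx : z = x
            · -- reached the exit: return
              rw [hx] at hPg hPmin hpath
              have hbeq : ((pvPopMin t ts).1.2.1 == x) = true := by rw [hpos, hx]; simp
              have hstep : pvLoopA R C x (n + 1) (t :: ts) vis = (pvPopMin t ts).1.2.2.dropLast := by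
                simp only [pvLoopA, hcont, hbeq]
                rfl
              refine ⟨p ++ [x], hPg, hPmin, ?_⟩
              rw [hstep, hpath]
            · -- expand
              have hbeq : ((pvPopMin t ts).1.2.1 == x) = false := by
                rw [hpos]; simp [hx]
              have hstep : pvLoopA R C x (n + 1) (t :: ts) vis =
                  pvLoopA R C x n
                    ((pvPopMin t ts).2 ++ pvChildren R C x (pvPopMin t ts).1.1 (pvPopMin t ts).1.2.1 (pvPopMin t ts).1.2.2)
                    (vis ++ [(pvPopMin t ts).1.2.1]) := by
                simp only [pvLoopA, hcont, hbeq]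
                rfl
              rw [hstep, hpos, hpath, hcost]
              have hzc : z ∈ pvCorners R C := by
                rw [pvNodes_eq] at hzn
                rcases List.mem_append.mp hzn with h | h
                · exact h
                · simp at h; exact absurd h hx
              have hvlen : vis.length ≤ 4 := by
                have hnd' : (vis ++ [z]).Nodup := by
                  rw [List.nodup_append]
                  refine ⟨inv.v_nodup, List.nodup_singleton _, ?_⟩
                  intro a ha b hb
                  simp only [List.mem_singleton] at hb
                  subst hb
                  exact fun hh => hvis (hh ▸ ha)
                have hsub : (vis ++ [z]) ⊆ e :: pvCorners R C := by
                  intro u hu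
                  rcases List.mem_append.mp hu with h | h
                  · rcases inv.v_sub u h with h' | h'
                    · simp [h']
                    · simp [h']
                  · simp at h; subst h; simp [hzc]
                have := (hnd'.subperm hsub).length_le
                simp [pvCorners] at this ⊢
                omega
              apply ihn
              · refine ⟨List.mem_append_left _ inv.v_e, ?_, ?_, ?_, ?_, ?_⟩
                · intro h
                  rcases List.mem_append.mp h with h | h
                  · exact inv.v_x h
                  · simp at h; exact hx h.symm
                · intro v hv
                  rcases List.mem_append.mp hv with h | h
                  · exact inv.v_sub v h
                  · simp at h; subst h; right; exact hzc
                · rw [List.nodup_append]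
                  refine ⟨inv.v_nodup, List.nodup_singleton _, ?_⟩
                  intro a ha b hb
                  simp only [List.mem_singleton] at hb
                  subst hb
                  exact fun hh => hvis (hh ▸ ha)
                · intro t' ht'
                  rcases List.mem_append.mp ht' with h | h
                  · obtain ⟨p', z', h1, h2, h3, h4, h5, h6⟩ := inv.w_open t' (hrest_sub t' h)
                    exact ⟨p', z', h1, h2, h3, h4, fun u hu => List.mem_append_left _ (h5 u hu), h6⟩
                  · rw [pvChildren_mem] at h
                    obtain ⟨c, hcn, hcal, rfl⟩ := h
                    refine ⟨p ++ [z], c, ?_, ?_, hPg.2.1, hPg.2.2.1, ?_, hcn⟩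
                    · rw [pvKey_snoc e (p ++ [z]) z c (pvEndFrom_snoc p z e)]
                    · rw [pvValid, pvChain_append]
                      refine ⟨hval, ?_⟩
                      rw [pvEndFrom_snoc, List.isChain_cons_cons]
                      exact ⟨⟨hcn, hcal⟩, List.isChain_singleton _⟩
                    · intro u hu
                      rcases List.mem_append.mp hu with h | h
                      · exact List.mem_append_left _ (hpvis u h)
                      · simp at h; subst h; exact List.mem_append_right _ (by simp)
                · intro v hv
                  rcases List.mem_append.mp hv with hvold | hvnew
                  · obtain ⟨pv, h1, h2, h3⟩ := inv.v_min v hvold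
                    refine ⟨pv, h1, h2, ?_⟩
                    intro z' hz' hal hnv
                    have hz'nv : z' ∉ vis := fun h => hnv (List.mem_append_left _ h)
                    obtain ⟨t', ht'm, ht'z, ht'le⟩ := h3 z' hz' hal hz'nv
                    refine ⟨t', ?_, ht'z, ht'le⟩
                    apply List.mem_append_left
                    apply hne_rest t' ht'm
                    intro hh
                    rw [hh, hpos] at ht'z
                    exact hnv (ht'z ▸ List.mem_append_right _ (by simp))
                  · simp only [List.mem_singleton] at hvnew
                    rw [hvnew]
                    refine ⟨p ++ [z], hPg, hPmin, ?_⟩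
                    intro z' hz' hal hnv
                    refine ⟨(pvCostFrom e (p ++ [z]) + |z'.1 - z.1| + |z'.2 - z.2|, (z', (p ++ [z]) ++ [z'])), ?_, rfl, ?_⟩
                    · apply List.mem_append_right
                      rw [pvChildren_mem]
                      exact ⟨z', hz', hal, rfl⟩
                    · rw [pvKey_snoc e (p ++ [z]) z z' (pvEndFrom_snoc p z e)]
                      exact pvLeE_refl _
              · have hclen := pvChildren_length_le (R := R) (C := C) (x := x)
                  (pvCostFrom e (p ++ [z])) z (p ++ [z])
                have e1 : ((pvPopMin t ts).2 ++ pvChildren R C x (pvCostFrom e (p ++ [z])) z (p ++ [z])).length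
                    = (pvPopMin t ts).2.length + (pvChildren R C x (pvCostFrom e (p ++ [z])) z (p ++ [z])).length := by
                  simp
                have e2 : (vis ++ [z]).length = vis.length + 1 := by simp
                have e3 : (t :: ts).length = ts.length + 1 := by simp
                rw [e1, e2]
                omega
theorem pv_goodto_self {R C : Int} {x e : Int × Int} {q : List (Int × Int)}
    (h : pvGoodTo R C x e e q) : q = [] := by
  obtain ⟨_, _, he, hend⟩ := h
  by_contra hq
  have := pvEndFrom_mem q e hq
  rw [hend] at this
  exact he this

-- the first iteration of A's loop, and the invariant it establishes
theorem pv_start {R C : Int} {e x : Int × Int} (hex : e ≠ x)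
    (hreach : ∃ q0, pvGoodTo R C x e x q0) :
    ∃ P, pvGoodTo R C x e x P ∧ (∀ Q, pvGoodTo R C x e x Q → pvLeE (pvKey e P) (pvKey e Q)) ∧
      pvLoopA R C x 32 [(0, (e, []))] [] = P.dropLast := by
  have hpop : pvPopMin (0, (e, ([] : List (Int × Int)))) [] = ((0, (e, [])), []) := rfl
  have hbe : (e == x) = false := by simp [hex]
  have h1 : pvLoopA R C x 32 [(0, (e, []))] [] =
      pvLoopA R C x 31 ([] ++ pvChildren R C x 0 e []) ([] ++ [e]) := by
    simp only [pvLoopA, hpop]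
    simp [hbe]
  rw [h1]
  apply pv_loop hreach
  · refine ⟨by simp, ?_, ?_, by simp, ?_, ?_⟩
    · simp only [List.nil_append, List.mem_singleton]
      exact fun h => hex h.symm
    · intro v hv; simp at hv; left; exact hv
    · intro t ht
      simp only [List.nil_append] at ht
      rw [pvChildren_mem] at ht
      obtain ⟨c, hcn, hcal, rfl⟩ := ht
      refine ⟨[], c, ?_, ?_, List.nodup_nil, by simp, by simp, hcn⟩
      · rw [pvKey_snoc e [] e c rfl]
        simp [pvCostFrom]
      · rw [pvValid]
        simp only [List.nil_append]
        rw [show (e :: [c]) = [e, c] from rfl, List.isChain_cons_cons]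
        exact ⟨⟨hcn, hcal⟩, List.isChain_singleton _⟩
    · intro v hv
      simp only [List.nil_append, List.mem_singleton] at hv
      subst hv
      refine ⟨[], ⟨List.isChain_singleton _, List.nodup_nil, by simp, rfl⟩, ?_, ?_⟩
      · intro q hq
        rw [pv_goodto_self hq]
        exact pvLeE_refl _
      · intro z' hz' hal hnv
        simp only [List.nil_append, List.mem_singleton] at hnv
        refine ⟨(0 + |z'.1 - v.1| + |z'.2 - v.2|, (z', [] ++ [z'])), ?_, rfl, ?_⟩
        · simp only [List.nil_append]
          rw [pvChildren_mem]
          exact ⟨z', hz', hal, rfl⟩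
        · rw [pvKey_snoc v [] v z' rfl]
          have : pvCostFrom v [] + |z'.1 - v.1| + |z'.2 - v.2| = 0 + |z'.1 - v.1| + |z'.2 - v.2| := by
            simp [pvCostFrom]
          rw [this]
          exact pvLeE_refl _
  · have := pvChildren_length_le (R := R) (C := C) (x := x) 0 e []
    simp only [List.nil_append, List.length_singleton]
    omega
-- ===== B-side: characterize pvRoutes =====
inductive PvRoute (R C : Int) (x : Int × Int) : (Int × Int) → List (Int × Int) → List (Int × Int) → Prop where
  | stop (path : List (Int × Int)) : PvRoute R C x x path []
  | step {pos : Int × Int} {path : List (Int × Int)} {nd : Int × Int} {s : List (Int × Int)}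
      (hne : pos ≠ x) (hmem : nd ∈ pvNodes R C x) (hnp : nd ≠ pos) (hnin : nd ∉ path)
      (hal : pvAligned pos nd) (hrec : PvRoute R C x nd (path ++ [nd]) s) :
      PvRoute R C x pos path (nd :: s)

theorem pvRoutes_sound {R C : Int} {x : Int × Int} :
    ∀ (fuel : Nat) (pos : Int × Int) (path : List (Int × Int)) (cost : Int) (c),
      c ∈ pvRoutes R C x fuel pos path cost →
      ∃ s, PvRoute R C x pos path s ∧ c = (cost + pvCostFrom pos s, path ++ s) := by
  intro fuel
  induction fuel with
  | zero => intro pos path cost c hc; simp [pvRoutes] at hc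
  | succ n ih =>
      intro pos path cost c hc
      by_cases hpx : pos = x
      · subst hpx
        simp only [pvRoutes, beq_self_eq_true, if_pos] at hc
        simp at hc
        refine ⟨[], PvRoute.stop path, ?_⟩
        simp [pvCostFrom, hc]
      · have hb : (pos == x) = false := by simp [hpx]
        simp only [pvRoutes, hb, Bool.false_eq_true, if_false] at hc
        rw [List.mem_flatMap] at hc
        obtain ⟨nd, hnd, hc⟩ := hc
        by_cases h1 : (nd == pos || path.contains nd) = true
        · rw [if_pos h1] at hc; simp at hc
        · rw [if_neg h1] at hc
          simp only [Bool.or_eq_true, not_or, Bool.not_eq_true] at h1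
          obtain ⟨h1a, h1b⟩ := h1
          have hnp : nd ≠ pos := by simpa using h1a
          have hnin : nd ∉ path := by
            intro hh; rw [List.contains_iff_mem.mpr hh] at h1b; cases h1b
          by_cases h2 : nd.1 ≠ pos.1 ∧ nd.2 ≠ pos.2
          · rw [if_pos h2] at hc; simp at hc
          · rw [if_neg h2] at hc
            have hal : pvAligned pos nd := by
              unfold pvAligned
              rcases not_and_or.mp h2 with h | h
              · left; omega
              · right; omega
            obtain ⟨s', hroute, hceq⟩ := ih nd (path ++ [nd]) (cost + |nd.1 - pos.1| + |nd.2 - pos.2|) c hc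
            refine ⟨nd :: s', PvRoute.step hpx hnd hnp hnin hal hroute, ?_⟩
            rw [hceq]
            simp only [Prod.mk.injEq]
            constructor
            · simp only [pvCostFrom]
              unfold pvW
              omega
            · simp
  
theorem pvRoutes_complete {R C : Int} {x : Int × Int} :
    ∀ {pos : Int × Int} {path : List (Int × Int)} {s : List (Int × Int)},
      PvRoute R C x pos path s → ∀ (cost : Int) (fuel : Nat), s.length < fuel →
      (cost + pvCostFrom pos s, path ++ s) ∈ pvRoutes R C x fuel pos path cost := by
  intro pos path s h
  induction h with
  | stop path =>
      intro cost fuel hf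
      cases fuel with
      | zero => omega
      | succ n =>
          simp only [pvRoutes, beq_self_eq_true, if_pos]
          simp [pvCostFrom]
  | step hne hmem hnp hnin hal hrec ih =>
      rename_i pos path nd s'
      intro cost fuel hf
      cases fuel with
      | zero => omega
      | succ n =>
          have hb : (pos == x) = false := by simp [hne]
          simp only [pvRoutes, hb, Bool.false_eq_true, if_false]
          rw [List.mem_flatMap]
          refine ⟨nd, hmem, ?_⟩
          have h1 : (nd == pos || path.contains nd) = false := by
            simp only [Bool.or_eq_false_iff]
            constructor
            · simp [hnp]
            · by_contra hh
              simp only [Bool.not_eq_false] at hh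
              exact hnin (List.contains_iff_mem.mp hh)
          rw [if_neg (by rw [h1]; simp)]
          have h2 : ¬(nd.1 ≠ pos.1 ∧ nd.2 ≠ pos.2) := by
            unfold pvAligned at hal
            rcases hal with h | h
            · intro hh; exact hh.1 h.symm
            · intro hh; exact hh.2 h.symm
          rw [if_neg h2]
          have := ih (cost + |nd.1 - pos.1| + |nd.2 - pos.2|) n (by simp at hf ⊢; omega)
          have heq : (cost + |nd.1 - pos.1| + |nd.2 - pos.2| + pvCostFrom nd s', (path ++ [nd]) ++ s')
              = (cost + pvCostFrom pos (nd :: s'), path ++ nd :: s') := by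
            simp only [Prod.mk.injEq]
            constructor
            · simp only [pvCostFrom]; unfold pvW; omega
            · simp
          rw [heq] at this
          exact this

-- structural facts about a generated route
theorem pvRoute_props {R C : Int} {x : Int × Int} :
    ∀ {pos : Int × Int} {path : List (Int × Int)} {s : List (Int × Int)},
      PvRoute R C x pos path s →
      List.IsChain (pvStep R C x) (pos :: s) ∧ s.Nodup ∧ (∀ u ∈ s, u ∉ path) ∧
        pvEndFrom pos s = x ∧ (∀ h : s ≠ [], s.head h ≠ pos) := by
  intro pos path s h
  induction h with
  | stop path =>
      exact ⟨List.isChain_singleton _, List.nodup_nil, by simp, rfl, by simp⟩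
  | step hne hmem hnp hnin hal hrec ih =>
      rename_i pos path nd s'
      obtain ⟨ich, ind, ipa, iend, ihd⟩ := ih
      refine ⟨?_, ?_, ?_, ?_, ?_⟩
      · cases s' with
        | nil => rw [List.isChain_cons_cons]; exact ⟨⟨hmem, hal⟩, ich⟩
        | cons a b => rw [List.isChain_cons_cons]; exact ⟨⟨hmem, hal⟩, ich⟩
      · rw [List.nodup_cons]
        refine ⟨?_, ind⟩
        intro hh
        exact ipa nd hh (by simp)
      · intro u hu
        rcases List.mem_cons.mp hu with h | h
        · subst h; exact hnin
        · intro hp; exact ipa u h (List.mem_append_left _ hp)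
      · simp only [pvEndFrom]; exact iend
      · intro _; simp only [List.head_cons]; exact hnp
-- route reconstruction from a good path
theorem pv_good_route {R C : Int} {x : Int × Int} :
    ∀ (s : List (Int × Int)) (pos : Int × Int) (path : List (Int × Int)),
      List.IsChain (pvStep R C x) (pos :: s) → s.Nodup → (∀ u ∈ s, u ∉ path) → pos ∉ s →
      pvEndFrom pos s = x → (s ≠ [] → pos ≠ x) → PvRoute R C x pos path s := by
  intro s
  induction s with
  | nil =>
      intro pos path _ _ _ _ hend _
      have : pos = x := hend
      subst this
      exact PvRoute.stop path
  | cons nd s' ih =>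
      intro pos path hch hnd hpa hpos hend hnx
      have hstep : pvStep R C x pos nd ∧ List.IsChain (pvStep R C x) (nd :: s') := by
        rw [List.isChain_cons_cons] at hch; exact hch
      have hne : pos ≠ x := hnx (by simp)
      have hnp : nd ≠ pos := fun h => hpos (by simp [h.symm])
      refine PvRoute.step hne hstep.1.1 hnp (hpa nd (by simp)) hstep.1.2 ?_
      apply ih nd (path ++ [nd]) hstep.2 (List.nodup_cons.mp hnd).2
      · intro u hu
        intro hmem
        rcases List.mem_append.mp hmem with h | h
        · exact hpa u (by simp [hu]) h
        · simp at h; subst h; exact (List.nodup_cons.mp hnd).1 hu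
      · exact (List.nodup_cons.mp hnd).1
      · exact hend
      · intro hs' hndx
        have hend' : pvEndFrom nd s' = x := hend
        have hmem2 : pvEndFrom nd s' ∈ s' := pvEndFrom_mem s' nd hs'
        rw [hend'] at hmem2
        rw [← hndx] at hmem2
        exact (List.nodup_cons.mp hnd).1 hmem2

theorem pv_chain_mem {R C : Int} {x : Int × Int} :
    ∀ (s : List (Int × Int)) (pos : Int × Int),
      List.IsChain (pvStep R C x) (pos :: s) → ∀ u ∈ s, u ∈ pvNodes R C x := by
  intro s
  induction s with
  | nil => intro pos _ u hu; simp at hu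
  | cons nd s' ih =>
      intro pos hch u hu
      rw [List.isChain_cons_cons] at hch
      rcases List.mem_cons.mp hu with h | h
      · subst h; exact hch.1.1
      · exact ih nd hch.2 u h

theorem pv_good_length {R C : Int} {x e v : Int × Int} {P : List (Int × Int)}
    (h : pvGoodTo R C x e v P) : P.length ≤ 5 := by
  have hsub : P ⊆ pvNodes R C x := fun u hu => pv_chain_mem P e h.1 u hu
  have := (h.2.1.subperm hsub).length_le
  simpa [pvNodes] using this

-- fold-min over B's candidate pairs
def pvEmb (d : Int × List (Int × Int)) : Int × ((Int × Int) × List (Int × Int)) :=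
  (d.1, ((0, 0), d.2))

theorem pvLtPair_emb (a b : Int × List (Int × Int)) :
    pvLtPair a b = pvLtEntry (pvEmb a) (pvEmb b) := by
  obtain ⟨a1, a2⟩ := a; obtain ⟨b1, b2⟩ := b
  exact pvLtPair_eq_entry a1 b1 (0, 0) a2 b2

theorem pvFoldMin : ∀ (cs : List (Int × List (Int × Int))) (c),
    (cs.foldl (fun acc d => if pvLtPair d acc then d else acc) c) ∈ c :: cs ∧
    ∀ d ∈ c :: cs, pvLtPair d (cs.foldl (fun acc d => if pvLtPair d acc then d else acc) c) = false := by
  intro cs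
  induction cs with
  | nil =>
      intro c
      refine ⟨by simp, ?_⟩
      intro d hd; simp at hd; subst hd
      rw [pvLtPair_emb]; exact pvLtEntry_irrefl _
  | cons y ys ih =>
      intro c
      simp only [List.foldl_cons]
      obtain ⟨ihm, ihmin⟩ := ih (if pvLtPair y c then y else c)
      constructor
      · by_cases hcy : pvLtPair y c = true
        · rw [if_pos hcy] at ihm ⊢
          rcases List.mem_cons.mp ihm with h | h
          · rw [h]; simp
          · simp [h]
        · rw [if_neg (by simp [hcy])] at ihm ⊢
          rcases List.mem_cons.mp ihm with h | h
          · rw [h]; simp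
          · simp [h]
      · intro d hd
        set r := ys.foldl (fun acc d => if pvLtPair d acc then d else acc)
          (if pvLtPair y c then y else c) with hr
        rcases List.mem_cons.mp hd with h | h
        · -- d = c
          rw [h]
          by_cases hcy : pvLtPair y c = true
          · rw [if_pos hcy] at ihmin
            have h1 : pvLtPair y r = false := ihmin y (by simp)
            rw [pvLtPair_emb] at h1 hcy ⊢
            exact pvLeE_trans h1 (pvLeE_of_lt hcy)
          · rw [if_neg (by simp [hcy])] at ihmin
            exact ihmin c (by simp)
        · rcases List.mem_cons.mp h with h2 | h2
          · -- d = y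
            rw [h2]
            by_cases hcy : pvLtPair y c = true
            · rw [if_pos hcy] at ihmin
              exact ihmin y (by simp)
            · rw [if_neg (by simp [hcy])] at ihmin
              have h1 : pvLtPair c r = false := ihmin c (by simp)
              have hcy' : pvLtPair y c = false := by simp [hcy]
              rw [pvLtPair_emb] at h1 hcy' ⊢
              exact pvLeE_trans h1 hcy'
          · exact ihmin d (by simp [h2])

theorem pvLeE_cost_le {e : Int × Int} {p q : List (Int × Int)}
    (h : pvLeE (pvKey e p) (pvKey e q)) : pvCostFrom e p ≤ pvCostFrom e q := by
  unfold pvLeE pvKey pvLtEntry at h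
  simp only [Bool.or_eq_false_iff, decide_eq_false_iff_not] at h
  omega

theorem pvLtPair_false_of_gt {a b : Int × List (Int × Int)} (h : b.1 < a.1) :
    pvLtPair a b = false := by
  obtain ⟨a1, a2⟩ := a; obtain ⟨b1, b2⟩ := b
  simp only [pvLtPair, Bool.or_eq_false_iff, Bool.and_eq_false_iff]
  simp at h ⊢
  omega

theorem pv_cost_pos_head {u h : Int × Int} {t : List (Int × Int)} (hh : h ≠ u) :
    0 < pvCostFrom u (h :: t) := by
  have h1 : 0 < pvW u h := pvW_pos (fun g => hh g.symm)
  have h2 := pvCostFrom_nonneg t h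
  simp only [pvCostFrom]
  omega
-- B's inner computation returns exactly the optimal path
theorem pv_alt_inner {R C : Int} {e x : Int × Int} (hex : e ≠ x)
    (P : List (Int × Int)) (hP : pvGoodTo R C x e x P)
    (hmin : ∀ Q, pvGoodTo R C x e x Q → pvLeE (pvKey e P) (pvKey e Q)) :
    (match pvRoutes R C x 6 e [] 0 with
     | [] => ([] : List (Int × Int))
     | c :: cs => (cs.foldl (fun acc d => if pvLtPair d acc then d else acc) c).2.dropLast) = P.dropLast := by
  obtain ⟨hval, hnd, hein, hend⟩ := hP
  have hroute : PvRoute R C x e [] P :=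
    pv_good_route P e [] hval hnd (by simp) hein hend (fun _ => hex)
  have hlen : P.length ≤ 5 := pv_good_length ⟨hval, hnd, hein, hend⟩
  have hmemP : (pvCostFrom e P, P) ∈ pvRoutes R C x 6 e [] 0 := by
    have := pvRoutes_complete hroute 0 6 (by omega)
    simpa using this
  -- every candidate dominates P
  have hdom : ∀ d ∈ pvRoutes R C x 6 e [] 0, pvLtPair d (pvCostFrom e P, P) = false := by
    intro d hd
    obtain ⟨s, hs, rfl⟩ := pvRoutes_sound 6 e [] 0 d hd
    obtain ⟨hch, hsnd, _, hsend, hshd⟩ := pvRoute_props hs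
    by_cases hes : e ∈ s
    · -- the route returns through the entry point: strictly worse than its final leg
      obtain ⟨s1, s2, rfl⟩ := List.append_of_mem hes
      have hs1ne : s1 ≠ [] := by
        intro hh; subst hh
        exact hshd (by simp) (by simp)
      obtain ⟨h1, t1, rfl⟩ := List.exists_cons_of_ne_nil hs1ne
      have hh1 : h1 ≠ e := by
        have := hshd (by simp)
        simpa using this
      -- the suffix s2 is itself a good path to x
      have hassoc : (h1 :: t1) ++ e :: s2 = ((h1 :: t1) ++ [e]) ++ s2 := by simp
      have hch2 : pvValid R C x e s2 := by
        have := hch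
        rw [hassoc] at this
        have h2 := (pvChain_append ((h1 :: t1) ++ [e]) s2 e).mp this
        rw [pvEndFrom_snoc] at h2
        exact h2.2
      have hnd2 : s2.Nodup ∧ e ∉ s2 := by
        have h3 : (e :: s2).Nodup := (List.nodup_append.mp hsnd).2.1
        exact ⟨(List.nodup_cons.mp h3).2, (List.nodup_cons.mp h3).1⟩
      have hend2 : pvEndFrom e s2 = x := by
        rw [hassoc, pvEndFrom_append, pvEndFrom_snoc] at hsend
        exact hsend
      have hgood2 : pvGoodTo R C x e x s2 := ⟨hch2, hnd2.1, hnd2.2, hend2⟩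
      have hcle : pvCostFrom e P ≤ pvCostFrom e s2 := pvLeE_cost_le (hmin s2 hgood2)
      have hsplit : pvCostFrom e ((h1 :: t1) ++ e :: s2)
          = pvCostFrom e ((h1 :: t1) ++ [e]) + pvCostFrom e s2 := by
        rw [hassoc, pvCostFrom_append, pvEndFrom_snoc]
      have hcpos : 0 < pvCostFrom e ((h1 :: t1) ++ [e]) := by
        simp only [List.cons_append]
        exact pv_cost_pos_head hh1
      apply pvLtPair_false_of_gt
      simp only
      omega
    · have hgood : pvGoodTo R C x e x s := ⟨hch, hsnd, hes, hsend⟩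
      have hle := hmin s hgood
      have hks : pvKey e s = (pvCostFrom e s, (x, s)) := by simp [pvKey, hsend]
      have hkP : pvKey e P = (pvCostFrom e P, (x, P)) := by simp [pvKey, hend]
      unfold pvLeE at hle
      rw [hks, hkP] at hle
      have : pvLtPair (pvCostFrom e s, s) (pvCostFrom e P, P) = false := by
        rw [pvLtPair_eq_entry _ _ x]
        exact hle
      simpa using this
  -- run the fold
  cases hcands : pvRoutes R C x 6 e [] 0 with
  | nil => rw [hcands] at hmemP; simp at hmemP
  | cons c cs =>
      rw [hcands] at hmemP hdom
      show (cs.foldl (fun acc d => if pvLtPair d acc then d else acc) c).2.dropLast = P.dropLast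
      obtain ⟨hfm, hfmin⟩ := pvFoldMin cs c
      set r := cs.foldl (fun acc d => if pvLtPair d acc then d else acc) c with hr
      have h1 : pvLtPair (pvCostFrom e P, P) r = false := hfmin _ hmemP
      have h2 : pvLtPair r (pvCostFrom e P, P) = false := hdom r hfm
      rw [pvLtPair_emb] at h1 h2
      have := pvLeE_antisymm (show pvLeE (pvEmb r) (pvEmb (pvCostFrom e P, P)) from h1)
        (show pvLeE (pvEmb (pvCostFrom e P, P)) (pvEmb r) from h2)
      have hreq : r = (pvCostFrom e P, P) := by
        unfold pvEmb at this
        obtain ⟨r1, r2⟩ := r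
        simp only [Prod.mk.injEq] at this
        simp [this.1, this.2.2]
      rw [hreq]
theorem pv_x_mem {R C : Int} {x : Int × Int} : x ∈ pvNodes R C x := by simp [pvNodes]

theorem pv_good2 {R C : Int} {x e u : Int × Int}
    (hu : u ∈ pvNodes R C x) (ha1 : pvAligned e u) (ha2 : pvAligned u x)
    (h1 : u ≠ e) (h2 : u ≠ x) (h3 : e ≠ x) : pvGoodTo R C x e x [u, x] := by
  refine ⟨?_, ?_, ?_, rfl⟩
  · rw [pvValid, List.isChain_cons_cons]
    refine ⟨⟨hu, ha1⟩, ?_⟩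
    rw [List.isChain_cons_cons]
    exact ⟨⟨pv_x_mem, ha2⟩, List.isChain_singleton _⟩
  · simp [h2]
  · intro hh
    rcases List.mem_cons.mp hh with h | h
    · exact h1 h.symm
    · simp at h; exact h3 h

theorem pv_good3 {R C : Int} {x e u v : Int × Int}
    (hu : u ∈ pvNodes R C x) (hv : v ∈ pvNodes R C x)
    (ha1 : pvAligned e u) (ha2 : pvAligned u v) (ha3 : pvAligned v x)
    (huv : u ≠ v) (hux : u ≠ x) (hvx : v ≠ x)
    (heu : u ≠ e) (hev : v ≠ e) (hex : e ≠ x) : pvGoodTo R C x e x [u, v, x] := by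
  refine ⟨?_, ?_, ?_, rfl⟩
  · rw [pvValid, List.isChain_cons_cons]
    refine ⟨⟨hu, ha1⟩, ?_⟩
    rw [List.isChain_cons_cons]
    refine ⟨⟨hv, ha2⟩, ?_⟩
    rw [List.isChain_cons_cons]
    exact ⟨⟨pv_x_mem, ha3⟩, List.isChain_singleton _⟩
  · simp [huv, hux, hvx]
  · intro hh
    rcases List.mem_cons.mp hh with h | h
    · exact heu h.symm
    rcases List.mem_cons.mp h with h | h
    · exact hev h.symm
    · simp at h; exact hex h

theorem pv_reach {R C : Int} {e x : Int × Int}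
    (he : e.1 = 0 ∨ e.1 = R ∨ e.2 = 0 ∨ e.2 = C)
    (hx : x.1 = 0 ∨ x.1 = R ∨ x.2 = 0 ∨ x.2 = C)
    (h1 : e.1 ≠ x.1) (h2 : e.2 ≠ x.2) : ∃ q, pvGoodTo R C x e x q := by
  obtain ⟨e1, e2⟩ := e
  obtain ⟨x1, x2⟩ := x
  simp only at he hx h1 h2
  have hex : (e1, e2) ≠ (x1, x2) := by simp [h1]
  by_cases he1 : e1 = 0 ∨ e1 = R
  · by_cases hx1 : x1 = 0 ∨ x1 = R
    · by_cases hx2 : x2 = 0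
      · refine ⟨[(e1, 0), (x1, x2)], pv_good2 ?_ ?_ ?_ ?_ ?_ hex⟩
        · rcases he1 with rfl | rfl <;> simp [pvNodes, pvCorners]
        · simp [pvAligned]
        · simp [pvAligned, hx2]
        · simp [Prod.ext_iff]; intro _; omega
        · simp [Prod.ext_iff]; omega
      · by_cases he2 : e2 = 0
        · refine ⟨[(x1, 0), (x1, x2)], pv_good2 ?_ ?_ ?_ ?_ ?_ hex⟩
          · rcases hx1 with rfl | rfl <;> simp [pvNodes, pvCorners]
          · simp [pvAligned, he2]
          · simp [pvAligned]
          · simp [Prod.ext_iff]; omega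
          · simp [Prod.ext_iff]; intro _; omega
        · refine ⟨[(e1, 0), (x1, 0), (x1, x2)],
            pv_good3 ?_ ?_ ?_ ?_ ?_ ?_ ?_ ?_ ?_ ?_ hex⟩
          · rcases he1 with rfl | rfl <;> simp [pvNodes, pvCorners]
          · rcases hx1 with rfl | rfl <;> simp [pvNodes, pvCorners]
          · simp [pvAligned]
          · simp [pvAligned]
          · simp [pvAligned]
          · simp [Prod.ext_iff]; omega
          · simp [Prod.ext_iff]; omega
          · simp [Prod.ext_iff]; intro _; omega
          · simp [Prod.ext_iff]; intro _; omega
          · simp [Prod.ext_iff]; omega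
    · have hx2 : x2 = 0 ∨ x2 = C := by tauto
      refine ⟨[(e1, x2), (x1, x2)], pv_good2 ?_ ?_ ?_ ?_ ?_ hex⟩
      · rcases he1 with rfl | rfl <;> rcases hx2 with rfl | rfl <;> simp [pvNodes, pvCorners]
      · simp [pvAligned]
      · simp [pvAligned]
      · simp [Prod.ext_iff]; intro _; omega
      · simp [Prod.ext_iff]; omega
  · have he2 : e2 = 0 ∨ e2 = C := by tauto
    by_cases hx2 : x2 = 0 ∨ x2 = C
    · by_cases hx1 : x1 = 0
      · refine ⟨[(0, e2), (x1, x2)], pv_good2 ?_ ?_ ?_ ?_ ?_ hex⟩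
        · rcases he2 with rfl | rfl <;> simp [pvNodes, pvCorners]
        · simp [pvAligned]
        · simp [pvAligned, hx1]
        · simp [Prod.ext_iff]; intro h; omega
        · simp [Prod.ext_iff]; intro _; omega
      · refine ⟨[(0, e2), (0, x2), (x1, x2)],
          pv_good3 ?_ ?_ ?_ ?_ ?_ ?_ ?_ ?_ ?_ ?_ hex⟩
        · rcases he2 with rfl | rfl <;> simp [pvNodes, pvCorners]
        · rcases hx2 with rfl | rfl <;> simp [pvNodes, pvCorners]
        · simp [pvAligned]
        · simp [pvAligned]
        · simp [pvAligned]
        · simp [Prod.ext_iff]; omega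
        · simp [Prod.ext_iff]; intro h; omega
        · simp [Prod.ext_iff]; intro h; omega
        · simp [Prod.ext_iff]; intro _; omega
        · simp [Prod.ext_iff]; intro _; omega
    · have hx1 : x1 = 0 ∨ x1 = R := by tauto
      refine ⟨[(x1, e2), (x1, x2)], pv_good2 ?_ ?_ ?_ ?_ ?_ hex⟩
      · rcases hx1 with rfl | rfl <;> rcases he2 with rfl | rfl <;> simp [pvNodes, pvCorners]
      · simp [pvAligned]
      · simp [pvAligned]
      · simp [Prod.ext_iff]; omega
      · simp [Prod.ext_iff]; intro _; omega

-- ===== VERDICT (by name: the statement is the Claim_ definition above) =====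
theorem elaborate_border_spec : Claim_equal_elaborate_border := by
  unfold Claim_equal_elaborate_border
  intro R C e x _ hpre
  unfold Pre_elaborate_border at hpre
  obtain ⟨hpe, hpx⟩ := hpre
  unfold Spec_elaborate_border elaborate_border elaborate_border_alt
  have hg1 : ¬((e.1 ≠ 0 ∧ e.1 ≠ R) ∧ (e.2 ≠ 0 ∧ e.2 ≠ C)) := by tauto
  have hg2 : ¬((x.1 ≠ 0 ∧ x.1 ≠ R) ∧ (x.2 ≠ 0 ∧ x.2 ≠ C)) := by tauto
  rw [if_neg hg1, if_neg hg1, if_neg hg2, if_neg hg2]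
  by_cases hg3 : e.1 = x.1 ∨ e.2 = x.2
  · rw [if_pos hg3, if_pos hg3]
  · rw [if_neg hg3, if_neg hg3]
    have h1 : e.1 ≠ x.1 := fun h => hg3 (Or.inl h)
    have h2 : e.2 ≠ x.2 := fun h => hg3 (Or.inr h)
    have hex : e ≠ x := fun h => h1 (by rw [h])
    obtain ⟨P, hPg, hPmin, hloop⟩ := pv_start hex (pv_reach hpe hpx h1 h2)
    rw [hloop]
    exact (pv_alt_inner hex P hPg hPmin).symm
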